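-- pv_equiv track=rewrite | github.com/GmeloG/SISCA | Modelo/model_comparison.py | get_feature_groups
-- ===== SOURCE A (Python) =====
-- def get_feature_groups(feature_cols: list[str]) -> dict[str, list[str]]:
--     """Define feature combinations for testing."""
--     groups = {
--         "All": feature_cols,
--         "Price_Only": [c for c in feature_cols if c in ["Open", "High", "Low", "Close", "Volume"]],
--         "Technical": [c for c in feature_cols if any(x in c for x in ["SMA", "EMA", "RSI", "ATR", "volatility"])],
--         "Momentum": [c for c in feature_cols if any(x in c for x in ["return", "RSI", "volatility"])],
--         "MovingAvg": [c for c in feature_cols if any(x in c for x in ["SMA", "EMA"])],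
--         "Volume": [c for c in feature_cols if "Volume" in c],
--         "Time": [c for c in feature_cols if c in ["year", "month", "day", "dayofweek", "is_month_start", "is_month_end"]],
--         "Tech_Volume": [c for c in feature_cols if any(x in c for x in ["SMA", "EMA", "RSI", "ATR", "volatility", "Volume"])],
--     }
--
--     # Filter to keep only groups with existing columns
--     return {k: v for k, v in groups.items() if v}
-- ===== SOURCE B (Python) =====
-- def get_feature_groups(feature_cols):
--     rules = [
--         ("All", "all", ()),
--         ("Price_Only", "exact", ("Open", "High", "Low", "Close", "Volume")),
--         ("Technical", "substr", ("SMA", "EMA", "RSI", "ATR", "volatility")),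
--         ("Momentum", "substr", ("return", "RSI", "volatility")),
--         ("MovingAvg", "substr", ("SMA", "EMA")),
--         ("Volume", "substr", ("Volume",)),
--         ("Time", "exact", ("year", "month", "day", "dayofweek", "is_month_start", "is_month_end")),
--         ("Tech_Volume", "substr", ("SMA", "EMA", "RSI", "ATR", "volatility", "Volume")),
--     ]
--
--     def matches(kind, pats, c):
--         return (kind == "all"
--                 or (kind == "exact" and c in pats)
--                 or (kind == "substr" and any(p in c for p in pats)))
--
--     buckets = [[] for _ in rules]
--     for c in feature_cols:
--         for (_, kind, pats), acc in zip(rules, buckets):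
--             if matches(kind, pats, c):
--                 acc.append(c)
--     return {name: acc for (name, _, _), acc in zip(rules, buckets) if acc}
-- ===== Notes on version B (the rewrite author's own statement) =====
-- stated objective: alternative
-- what changed: Replaced eight separate comprehension scans with inlined predicates by an explicit rule table (group name, match kind, patterns) driving a single forward pass that fills parallel buckets, then emits non-empty groups in rule order.
import Mathlib
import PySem

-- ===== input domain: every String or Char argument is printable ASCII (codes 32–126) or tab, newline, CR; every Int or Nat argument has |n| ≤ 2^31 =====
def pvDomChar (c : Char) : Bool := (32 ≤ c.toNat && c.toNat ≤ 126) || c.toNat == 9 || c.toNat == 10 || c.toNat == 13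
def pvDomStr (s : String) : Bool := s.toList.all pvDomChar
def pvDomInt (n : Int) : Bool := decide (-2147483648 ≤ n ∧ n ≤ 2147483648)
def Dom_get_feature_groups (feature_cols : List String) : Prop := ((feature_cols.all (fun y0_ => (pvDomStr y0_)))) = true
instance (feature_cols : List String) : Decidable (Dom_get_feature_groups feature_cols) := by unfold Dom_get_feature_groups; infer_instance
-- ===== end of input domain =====

-- B replaces A's eight independent comprehension scans by a rule table driving a single pass (alternative decomposition, same cost).

-- ===== PORT A =====
def get_feature_groups (feature_cols : List String) : List (String × List String) :=
  let groups : List (String × List String) :=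
    [ ("All", feature_cols),
      ("Price_Only", feature_cols.filter (fun c => (["Open","High","Low","Close","Volume"] : List String).contains c)),
      ("Technical", feature_cols.filter (fun c => (["SMA","EMA","RSI","ATR","volatility"] : List String).any (fun x => PySem.Str.isIn x c))),
      ("Momentum", feature_cols.filter (fun c => (["return","RSI","volatility"] : List String).any (fun x => PySem.Str.isIn x c))),
      ("MovingAvg", feature_cols.filter (fun c => (["SMA","EMA"] : List String).any (fun x => PySem.Str.isIn x c))),
      ("Volume", feature_cols.filter (fun c => PySem.Str.isIn "Volume" c)),
      ("Time", feature_cols.filter (fun c => (["year","month","day","dayofweek","is_month_start","is_month_end"] : List String).contains c)),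
      ("Tech_Volume", feature_cols.filter (fun c => (["SMA","EMA","RSI","ATR","volatility","Volume"] : List String).any (fun x => PySem.Str.isIn x c))) ]
  groups.filter (fun kv => !kv.2.isEmpty)

-- ===== PORT B =====
-- the rule table of Source B: (group name, match kind, patterns)
def gfgRules : List (String × String × List String) :=
  [ ("All", "all", []),
    ("Price_Only", "exact", ["Open","High","Low","Close","Volume"]),
    ("Technical", "substr", ["SMA","EMA","RSI","ATR","volatility"]),
    ("Momentum", "substr", ["return","RSI","volatility"]),
    ("MovingAvg", "substr", ["SMA","EMA"]),
    ("Volume", "substr", ["Volume"]),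
    ("Time", "exact", ["year","month","day","dayofweek","is_month_start","is_month_end"]),
    ("Tech_Volume", "substr", ["SMA","EMA","RSI","ATR","volatility","Volume"]) ]

def gfgMatches (kind : String) (pats : List String) (c : String) : Bool :=
  kind == "all" || (kind == "exact" && pats.contains c)
    || (kind == "substr" && pats.any (fun p => PySem.Str.isIn p c))

-- one column against every rule: the inner 'for …, acc in zip(rules, buckets)' loop
def gfgStep (accs : List (List String)) (c : String) : List (List String) :=
  (gfgRules.zip accs).map (fun rp => if gfgMatches rp.1.2.1 rp.1.2.2 c then rp.2 ++ [c] else rp.2)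

def get_feature_groups_alt (feature_cols : List String) : List (String × List String) :=
  let accs := feature_cols.foldl gfgStep (gfgRules.map (fun _ => []))
  (gfgRules.zip accs).filterMap (fun rp => if rp.2.isEmpty then none else some (rp.1.1, rp.2))

-- ===== PRECONDITION & SPEC =====
def Spec_get_feature_groups (feature_cols : List String) (out : List (String × List String)) : Prop := out = get_feature_groups_alt feature_cols
instance (feature_cols : List String) (out : List (String × List String)) : Decidable (Spec_get_feature_groups feature_cols out) := by unfold Spec_get_feature_groups; infer_instance

-- ===== CLAIM (what is proved, stated in full; the proofs are below) =====
def Claim_equal_get_feature_groups : Prop := ∀ (feature_cols : List String), Dom_get_feature_groups feature_cols → Spec_get_feature_groups feature_cols (get_feature_groups feature_cols)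

-- ===== LEMMAS AND PROOFS =====

-- loop invariant: the buckets after the fold are the rule-wise filters of the columns seen so far
lemma gfg_inv (cols pre : List String) :
    cols.foldl gfgStep (gfgRules.map (fun r => pre.filter (gfgMatches r.2.1 r.2.2))) =
    gfgRules.map (fun r => (pre ++ cols).filter (gfgMatches r.2.1 r.2.2)) := by
  induction cols generalizing pre with
  | nil => simp
  | cons c cs ih =>
    have hstep : gfgStep (gfgRules.map (fun r => pre.filter (gfgMatches r.2.1 r.2.2))) c =
        gfgRules.map (fun r => (pre ++ [c]).filter (gfgMatches r.2.1 r.2.2)) := by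
      simp only [gfgStep, gfgRules, List.map, List.zip, List.zipWith, List.filter_append,
        List.filter_cons, List.filter_nil]
      split_ifs <;> simp
    rw [List.foldl_cons, hstep, ih, List.append_assoc]
    rfl

lemma gfgMatches_all (c : String) : gfgMatches "all" [] c = true := rfl

lemma gfgMatches_exact (pats : List String) (c : String) :
    gfgMatches "exact" pats c = pats.contains c := by simp [gfgMatches]

lemma gfgMatches_substr (pats : List String) (c : String) :
    gfgMatches "substr" pats c = pats.any (fun p => PySem.Str.isIn p c) := by simp [gfgMatches]

lemma gfgMatches_all' : gfgMatches "all" [] = fun _ => true := funext gfgMatches_all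

lemma gfgMatches_exact' (pats : List String) :
    gfgMatches "exact" pats = fun c => pats.contains c := funext (gfgMatches_exact pats)

lemma gfgMatches_substr' (pats : List String) :
    gfgMatches "substr" pats = fun c => pats.any (fun p => PySem.Str.isIn p c) :=
  funext (gfgMatches_substr pats)

lemma gfg_filter_eq_filterMap (l : List (String × List String)) :
    l.filter (fun kv => !kv.2.isEmpty) =
    l.filterMap (fun kv => if kv.2.isEmpty then none else some kv) := by
  induction l with
  | nil => rfl
  | cons kv t ih =>
    rcases kv with ⟨n, v⟩
    cases v <;> simp [ih]

theorem get_feature_groups_spec : Claim_equal_get_feature_groups := by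
  intro fc _
  show get_feature_groups fc = get_feature_groups_alt fc
  have h0 : (gfgRules.map (fun _ => ([] : List String))) =
      gfgRules.map (fun r => ([] : List String).filter (gfgMatches r.2.1 r.2.2)) := rfl
  unfold get_feature_groups get_feature_groups_alt
  rw [h0, gfg_inv fc []]
  simp only [List.nil_append]
  rw [← List.map_prod_left_eq_zip, List.filterMap_map, gfg_filter_eq_filterMap]
  simp only [gfgRules, List.filterMap, Function.comp, gfgMatches_all', gfgMatches_exact',
    gfgMatches_substr', List.filter_true, List.any_cons, List.any_nil, Bool.or_false]
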